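-- pv_equiv track=rewrite | github.com/snowcrab382/Algorithm_Solution | 프로그래머스/lv2/76502. 괄호 회전하기/괄호 회전하기.py | solution
-- ===== SOURCE A (Python) =====
-- from collections import deque
--
-- def solution(s):
--     queue = deque(s)
--     cnt = 0
--     start = 0
--     while start < len(s):
--         check = []
--
--         for j in queue:
--             if len(check) != 0 and check[-1] == '[' and j == ']':
--                 check.pop()
--                 continue
--             if len(check) != 0 and check[-1] == '(' and j == ')':
--                 check.pop()
--                 continue
--             if len(check) != 0 and check[-1] == '{' and j == '}':
--                 check.pop()
--                 continue
--             check.append(j)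
--
--         if len(check) == 0:
--             cnt += 1
--
--         queue.append(queue.popleft())
--         start += 1
--
--     return cnt
-- ===== SOURCE B (Python) =====
-- def solution(s):
--     cnt = 0
--     for i in range(len(s)):
--         t = s[i:] + s[:i]
--         while True:
--             u = t.replace('()', '').replace('[]', '').replace('{}', '')
--             if u == t:
--                 break
--             t = u
--         if t == '':
--             cnt += 1
--     return cnt
-- ===== Notes on version B (the rewrite author's own statement) =====
-- stated objective: alternative
-- what changed: The rotating-deque stack scan per rotation is replaced by slicing each rotation directly and deciding validity by repeatedly deleting adjacent matched bracket pairs with str.replace until a fixed point, counting rotations that reduce to the empty string.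
import Mathlib
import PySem

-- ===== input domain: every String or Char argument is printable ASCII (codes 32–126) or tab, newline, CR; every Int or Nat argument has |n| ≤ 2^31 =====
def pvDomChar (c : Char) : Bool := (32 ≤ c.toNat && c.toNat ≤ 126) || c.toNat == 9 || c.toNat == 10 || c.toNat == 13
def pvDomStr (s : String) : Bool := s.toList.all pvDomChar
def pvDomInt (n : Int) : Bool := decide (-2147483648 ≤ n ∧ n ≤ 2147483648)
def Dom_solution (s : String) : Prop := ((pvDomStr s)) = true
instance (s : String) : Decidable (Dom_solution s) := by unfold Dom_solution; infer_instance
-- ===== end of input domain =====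

-- B replaces A's per-rotation stack scan by fixed-point deletion of adjacent matched pairs
-- via str.replace on each rotated slice (an alternative algorithm; a timing run measured it faster).

-- ===== PORT A =====
-- inner 'for j in queue' body: the three pop-or-continue checks, else append
def step (st : List Char) (j : Char) : List Char :=
  if st ≠ [] ∧ st.getLast? = some '[' ∧ j = ']' then st.dropLast
  else if st ≠ [] ∧ st.getLast? = some '(' ∧ j = ')' then st.dropLast
  else if st ≠ [] ∧ st.getLast? = some '{' ∧ j = '}' then st.dropLast
  else st ++ [j]

-- queue.append(queue.popleft()); the [] case is unreachable (the while loop runs only if len(s) > 0)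
def popAppend (q : List Char) : List Char :=
  match q with
  | [] => []
  | x :: xs => xs ++ [x]

-- the while loop; fuel = len(s) - start
def loopA : Nat → List Char → Int → Int
  | 0, _q, cnt => cnt
  | f + 1, q, cnt =>
      let check := q.foldl step []
      let cnt' := if check = [] then cnt + 1 else cnt
      loopA f (popAppend q) cnt'

def solution (s : String) : Int := loopA s.toList.length s.toList 0

-- ===== PORT B =====
-- t.replace('()','').replace('[]','').replace('{}','')
def red1 (t : List Char) : List Char :=
  PySem.Chars.replace (PySem.Chars.replace (PySem.Chars.replace t ['(', ')'] []) ['[', ']'] []) ['{', '}'] []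

-- proof helper cited by fixRed's termination: one replace pass as a simple recursion
def rep (o c : Char) : List Char → List Char
  | [] => []
  | [a] => [a]
  | a :: b :: t => if a = o ∧ b = c then rep o c t else a :: rep o c (b :: t)

theorem go_eq_rep (o c : Char) : ∀ (fuel : Nat) (l acc : List Char), l.length ≤ fuel →
    PySem.Chars.replace.go [o, c] [] fuel l acc = acc.reverse ++ rep o c l := by
  intro fuel
  induction fuel with
  | zero =>
      intro l acc h
      have : l = [] := by cases l <;> simp_all
      subst this
      simp [PySem.Chars.replace.go, rep]
  | succ f ih =>
      intro l acc h
      match l with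
      | [] => simp [PySem.Chars.replace.go, rep]
      | [a] =>
          rw [PySem.Chars.replace.go]
          have hpre : List.isPrefixOf [o, c] [a] = false := by simp [List.isPrefixOf]
          simp only [hpre, Bool.false_eq_true, if_false]
          have : ([] : List Char).length ≤ f := by simp
          rw [ih [] (a :: acc) this]
          simp [rep]
      | a :: b :: t =>
          rw [PySem.Chars.replace.go]
          by_cases hab : a = o ∧ b = c
          · obtain ⟨ha, hb⟩ := hab; subst ha; subst hb
            have hpre : List.isPrefixOf [a, b] (a :: b :: t) = true := by
              simp [List.isPrefixOf]
            simp only [hpre, if_true]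
            have ht : t.length ≤ f := by simp at h; omega
            rw [show List.drop (List.length [a,b]) (a :: b :: t) = t by simp]
            rw [ih t (List.reverse [] ++ acc) (by simpa using ht)]
            simp [rep]
          · have hpre : List.isPrefixOf [o, c] (a :: b :: t) = false := by
              simp [List.isPrefixOf]
              intro ho hc
              exact absurd ⟨ho.symm, hc.symm⟩ hab
            simp only [hpre, Bool.false_eq_true, if_false]
            have ht : (b :: t).length ≤ f := by simp at h ⊢; omega
            rw [ih (b :: t) (a :: acc) ht]
            simp [rep, hab]

theorem replace_eq_rep (o c : Char) (l : List Char) :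
    PySem.Chars.replace l [o, c] [] = rep o c l := by
  rw [PySem.Chars.replace]
  simp only [List.isEmpty_cons, Bool.false_eq_true, if_false]
  rw [go_eq_rep o c l.length l [] (le_refl _)]
  simp

theorem rep_len_le (o c : Char) (l : List Char) : (rep o c l).length ≤ l.length := by
  fun_induction rep o c l with
  | case1 => simp
  | case2 => simp
  | case3 a b t hab ih => simp_all; omega
  | case4 a b t hab ih => simp_all

theorem rep_eq_of_len (o c : Char) (l : List Char) (h : (rep o c l).length = l.length) :
    rep o c l = l := by
  fun_induction rep o c l with
  | case1 => rfl
  | case2 => rfl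
  | case3 a b t hab ih =>
      exfalso
      have := rep_len_le o c t
      simp at h; omega
  | case4 a b t hab ih =>
      simp at h
      rw [ih h]

theorem red1_len_le (t : List Char) : (red1 t).length ≤ t.length := by
  unfold red1
  rw [replace_eq_rep, replace_eq_rep, replace_eq_rep]
  calc (rep '{' '}' (rep '[' ']' (rep '(' ')' t))).length
      ≤ (rep '[' ']' (rep '(' ')' t)).length := rep_len_le _ _ _
    _ ≤ (rep '(' ')' t).length := rep_len_le _ _ _
    _ ≤ t.length := rep_len_le _ _ _

theorem red1_eq_of_len (t : List Char) (heq : (red1 t).length = t.length) : red1 t = t := by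
  unfold red1 at heq ⊢
  rw [replace_eq_rep, replace_eq_rep, replace_eq_rep] at heq ⊢
  have l1 := rep_len_le '(' ')' t
  have l2 := rep_len_le '[' ']' (rep '(' ')' t)
  have l3 := rep_len_le '{' '}' (rep '[' ']' (rep '(' ')' t))
  have e1 : rep '(' ')' t = t := rep_eq_of_len _ _ _ (by omega)
  rw [e1] at heq l2 l3 ⊢
  have e2 : rep '[' ']' t = t := rep_eq_of_len _ _ _ (by omega)
  rw [e2] at heq l3 ⊢
  exact rep_eq_of_len _ _ _ heq

theorem red1_ne_len_lt (t : List Char) (h : red1 t ≠ t) : (red1 t).length < t.length := by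
  rcases lt_or_eq_of_le (red1_len_le t) with hlt | heq
  · exact hlt
  · exact absurd (red1_eq_of_len t heq) h

-- the while loop: reduce until the replace pass changes nothing
def fixRed (t : List Char) : List Char :=
  let u := red1 t
  if h : u = t then t
  else fixRed u
termination_by t.length
decreasing_by exact red1_ne_len_lt t h

def solution_alt (s : String) : Int :=
  (PySem.List.pyRange 0 (s.toList.length : Int) 1).foldl
    (fun cnt i =>
      let t := PySem.Chars.slice s.toList (some i) none ++ PySem.Chars.slice s.toList none (some i)
      if fixRed t = [] then cnt + 1 else cnt) 0

-- ===== PRECONDITION & SPEC =====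
def Spec_solution (s : String) (out : Int) : Prop := out = solution_alt s
instance (s : String) (out : Int) : Decidable (Spec_solution s out) := by unfold Spec_solution; infer_instance

-- ===== CLAIM (what is proved, stated in full; the proofs are below) =====
def Claim_equal_solution : Prop := ∀ (s : String), Dom_solution s → Spec_solution s (solution s)

-- ===== LEMMAS AND PROOFS =====

theorem red1_reps_eq (t : List Char) (h : red1 t = t) :
    rep '(' ')' t = t ∧ rep '[' ']' t = t ∧ rep '{' '}' t = t := by
  unfold red1 at h
  rw [replace_eq_rep, replace_eq_rep, replace_eq_rep] at h
  have hlen := congrArg List.length h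
  have l1 := rep_len_le '(' ')' t
  have l2 := rep_len_le '[' ']' (rep '(' ')' t)
  have l3 := rep_len_le '{' '}' (rep '[' ']' (rep '(' ')' t))
  have e1 : rep '(' ')' t = t := rep_eq_of_len _ _ _ (by omega)
  rw [e1] at h hlen l2 l3
  have e2 : rep '[' ']' t = t := rep_eq_of_len _ _ _ (by omega)
  rw [e2] at h hlen l3
  exact ⟨e1, e2, h⟩

def matchedB (a b : Char) : Bool :=
  (a == '(' && b == ')') || (a == '[' && b == ']') || (a == '{' && b == '}')

def noPairB : List Char → Bool
  | a :: b :: t => !matchedB a b && noPairB (b :: t)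
  | _ => true

theorem step_push (st : List Char) (j : Char)
    (h : ∀ a, st.getLast? = some a → matchedB a j = false) : step st j = st ++ [j] := by
  unfold step
  split_ifs with h1 h2 h3
  · exfalso; have := h '[' h1.2.1; simp [matchedB, h1.2.2] at this
  · exfalso; have := h '(' h2.2.1; simp [matchedB, h2.2.2] at this
  · exfalso; have := h '{' h3.2.1; simp [matchedB, h3.2.2] at this
  · rfl

theorem step_pop (st : List Char) (a b : Char) (hm : matchedB a b = true) :
    step (st ++ [a]) b = st := by
  simp only [matchedB, Bool.or_eq_true, Bool.and_eq_true, beq_iff_eq] at hm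
  rcases hm with (⟨rfl, rfl⟩ | ⟨rfl, rfl⟩) | ⟨rfl, rfl⟩ <;> simp [step]

theorem stack_noPair : ∀ (l st : List Char), noPairB l = true →
    (∀ a j, st.getLast? = some a → l.head? = some j → matchedB a j = false) →
    List.foldl step st l = st ++ l := by
  intro l
  induction l with
  | nil => intro st _ _; simp
  | cons j l' ih =>
      intro st hnp hhead
      have hstep : step st j = st ++ [j] := by
        apply step_push
        intro a ha
        exact hhead a j ha rfl
      rw [List.foldl_cons, hstep]
      have hnp' : noPairB l' = true := by
        cases l' with
        | nil => rfl
        | cons b t => simp [noPairB] at hnp; exact hnp.2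
      have hhead' : ∀ a k, (st ++ [j]).getLast? = some a → l'.head? = some k →
          matchedB a k = false := by
        intro a k ha hk
        simp at ha
        subst ha
        cases l' with
        | nil => simp at hk
        | cons b t =>
            simp at hk
            subst hk
            simp [noPairB] at hnp
            simpa using hnp.1
      rw [ih (st ++ [j]) hnp' hhead']
      simp

theorem stack_noPair_nil (l : List Char) (h : noPairB l = true) :
    List.foldl step [] l = l := by
  have := stack_noPair l [] h (by intro a j ha; simp at ha)
  simpa using this

def noAdjB (o c : Char) : List Char → Bool
  | a :: b :: t => !(a == o && b == c) && noAdjB o c (b :: t)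
  | _ => true

theorem rep_eq_no_adj (o c : Char) (l : List Char) (h : rep o c l = l) :
    noAdjB o c l = true := by
  fun_induction rep o c l with
  | case1 => rfl
  | case2 => rfl
  | case3 a b t hab ih =>
      exfalso
      have hlen := congrArg List.length h
      have := rep_len_le o c t
      simp at hlen; omega
  | case4 a b t hab ih =>
      simp at h
      simp [noAdjB, ih h]
      tauto

theorem noPair_of_adjs : ∀ (l : List Char), noAdjB '(' ')' l = true →
    noAdjB '[' ']' l = true → noAdjB '{' '}' l = true → noPairB l = true := by
  intro l
  induction l with
  | nil => intro _ _ _; rfl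
  | cons a l' ih =>
      cases l' with
      | nil => intro _ _ _; rfl
      | cons b t =>
          intro h1 h2 h3
          simp [noAdjB] at h1 h2 h3
          simp [noPairB, matchedB, ih h1.2 h2.2 h3.2]
          tauto

theorem rep_stack (o c : Char) (ho : ∀ st, step st o = st ++ [o])
    (hc : ∀ st, step (st ++ [o]) c = st) (l : List Char) :
    ∀ st, List.foldl step st (rep o c l) = List.foldl step st l := by
  fun_induction rep o c l with
  | case1 => intro st; rfl
  | case2 => intro st; rfl
  | case3 a b t hab ih =>
      obtain ⟨ha, hb⟩ := hab; subst ha; subst hb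
      intro st
      rw [ih st]
      simp only [List.foldl_cons]
      rw [ho st, hc st]
  | case4 a b t hab ih =>
      intro st
      simp only [List.foldl_cons]
      exact ih (step st a)

theorem step_push_paren : ∀ st, step st '(' = st ++ ['('] := by
  intro st; simp [step]
theorem step_push_bracket : ∀ st, step st '[' = st ++ ['['] := by
  intro st; simp [step]
theorem step_push_brace : ∀ st, step st '{' = st ++ ['{'] := by
  intro st; simp [step]

theorem red1_stack (t : List Char) (st : List Char) :
    List.foldl step st (red1 t) = List.foldl step st t := by
  unfold red1
  rw [replace_eq_rep, replace_eq_rep, replace_eq_rep]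
  rw [rep_stack '{' '}' step_push_brace (fun st => by simpa using step_pop st '{' '}' (by decide))]
  rw [rep_stack '[' ']' step_push_bracket (fun st => by simpa using step_pop st '[' ']' (by decide))]
  rw [rep_stack '(' ')' step_push_paren (fun st => by simpa using step_pop st '(' ')' (by decide))]

theorem fixRed_stack (t : List Char) :
    List.foldl step [] (fixRed t) = List.foldl step [] t := by
  fun_induction fixRed t with
  | case1 t u h => rfl
  | case2 t u h ih => rw [ih]; exact red1_stack t []

theorem fixRed_fix (t : List Char) : red1 (fixRed t) = fixRed t := by
  fun_induction fixRed t with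
  | case1 t u h => exact h
  | case2 t u h ih => exact ih

theorem valid_iff (t : List Char) : fixRed t = [] ↔ List.foldl step [] t = [] := by
  constructor
  · intro h
    rw [← fixRed_stack t, h]
    rfl
  · intro h
    by_contra hne
    have hfix := fixRed_fix t
    obtain ⟨e1, e2, e3⟩ := red1_reps_eq (fixRed t) hfix
    have hnp : noPairB (fixRed t) = true :=
      noPair_of_adjs _ (rep_eq_no_adj _ _ _ e1) (rep_eq_no_adj _ _ _ e2) (rep_eq_no_adj _ _ _ e3)
    have : List.foldl step [] (fixRed t) = fixRed t := stack_noPair_nil _ hnp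
    rw [fixRed_stack t, h] at this
    exact hne this.symm

def rotN (ls : List Char) (k : Nat) : List Char := ls.drop k ++ ls.take k

theorem popAppend_rot (ls : List Char) (k : Nat) (h : k < ls.length) :
    popAppend (rotN ls k) = rotN ls (k + 1) := by
  unfold rotN
  rw [List.drop_eq_getElem_cons h]
  show (List.drop (k+1) ls ++ List.take k ls) ++ [ls[k]] = _
  rw [List.append_assoc]
  congr 1
  rw [List.take_add_one]
  simp [List.getElem?_eq_getElem h]

theorem loop_eq (m : Nat) : ∀ (k : Nat) (ls : List Char) (cnt : Int), k + m = ls.length →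
    loopA m (rotN ls k) cnt =
      (PySem.List.pyRange (k : Int) (ls.length : Int) 1).foldl
        (fun cnt i =>
          let t := PySem.Chars.slice ls (some i) none ++ PySem.Chars.slice ls none (some i)
          if fixRed t = [] then cnt + 1 else cnt) cnt := by
  induction m with
  | zero =>
      intro k ls cnt h
      rw [loopA]
      rw [PySem.List.pyRange_one_eq_nil (by omega)]
      rfl
  | succ f ih =>
      intro k ls cnt h
      have hk : k < ls.length := by omega
      rw [loopA]
      rw [PySem.List.pyRange_one_cons (by exact_mod_cast hk)]
      rw [List.foldl_cons]
      have hslice : PySem.Chars.slice ls (some (k : Int)) none ++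
          PySem.Chars.slice ls none (some (k : Int)) = rotN ls k := by
        simp [PySem.List.slice_from_natCast, PySem.List.slice_to_natCast, rotN]
      have hcond : (fixRed (PySem.Chars.slice ls (some (k : Int)) none ++
          PySem.Chars.slice ls none (some (k : Int))) = []) ↔
          (List.foldl step [] (rotN ls k) = []) := by
        rw [hslice]; exact valid_iff _
      have hcast : (k : Int) + 1 = ((k + 1 : Nat) : Int) := by push_cast; ring
      rw [hcast]
      rw [← ih (k + 1) ls _ (by omega)]
      rw [popAppend_rot ls k hk]
      simp only []
      by_cases hc : List.foldl step [] (rotN ls k) = []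
      · rw [if_pos hc, if_pos (hcond.mpr hc)]
      · rw [if_neg hc, if_neg (fun hx => hc (hcond.mp hx))]

-- ===== VERDICT (by name: the statement is the Claim_ definition above) =====
theorem solution_spec : Claim_equal_solution := by
  unfold Claim_equal_solution
  intro s _
  unfold Spec_solution solution solution_alt
  have h0 : s.toList = rotN s.toList 0 := by simp [rotN]
  rw [show loopA s.toList.length s.toList 0 = loopA s.toList.length (rotN s.toList 0) 0 by
        rw [← h0]]
  rw [loop_eq s.toList.length 0 s.toList 0 (by omega)]
  norm_num
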